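-- pv_equiv track=rewrite | github.com/Agony5757/QPanda-lite | qpandalite/algorithmics/ansatz/qaoa_ansatz.py | _parse_pauli_string
-- ===== SOURCE A (Python) =====
-- from typing import List, Optional, Tuple
--
-- def _parse_pauli_string(pauli_string: str) -> List[Tuple[str, int]]:
--     """Parse a Pauli string like 'Z0Z1' or 'X0Y1Z2' into [(op, qubit), ...]."""
--     terms = []
--     current_op = None
--     current_idx = ""
--     for ch in pauli_string:
--         if ch in "XYZI":
--             if current_op is not None:
--                 terms.append((current_op, int(current_idx)))
--             current_op = ch
--             current_idx = ""
--         elif ch.isdigit():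
--             current_idx += ch
--     if current_op is not None:
--         terms.append((current_op, int(current_idx)))
--     return terms
-- ===== SOURCE B (Python) =====
-- from typing import List, Tuple
--
-- def _parse_pauli_string(pauli_string: str) -> List[Tuple[str, int]]:
--     """Segment-based parse: cut the string at operator characters and read
--     the digits of each operator's trailing segment."""
--     terms = []
--     s = pauli_string
--     # drop everything before the first operator
--     while s and s[0] not in "XYZI":
--         s = s[1:]
--     while s:
--         op, rest = s[0], s[1:]
--         seg_len = 0
--         while seg_len < len(rest) and rest[seg_len] not in "XYZI":
--             seg_len += 1
--         digits = "".join(c for c in rest[:seg_len] if c.isdigit())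
--         terms.append((op, int(digits)))
--         s = rest[seg_len:]
--     return terms
-- ===== Notes on version B (the rewrite author's own statement) =====
-- stated objective: alternative
-- what changed: Replaces A's single-pass character automaton carrying (terms, current_op, current_idx) state by a segment-based parser: skip to the first operator, then repeatedly slice off the segment up to the next operator and read its digits; structurally different, and it trades A's linear scan for slice copies.
import Mathlib
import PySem

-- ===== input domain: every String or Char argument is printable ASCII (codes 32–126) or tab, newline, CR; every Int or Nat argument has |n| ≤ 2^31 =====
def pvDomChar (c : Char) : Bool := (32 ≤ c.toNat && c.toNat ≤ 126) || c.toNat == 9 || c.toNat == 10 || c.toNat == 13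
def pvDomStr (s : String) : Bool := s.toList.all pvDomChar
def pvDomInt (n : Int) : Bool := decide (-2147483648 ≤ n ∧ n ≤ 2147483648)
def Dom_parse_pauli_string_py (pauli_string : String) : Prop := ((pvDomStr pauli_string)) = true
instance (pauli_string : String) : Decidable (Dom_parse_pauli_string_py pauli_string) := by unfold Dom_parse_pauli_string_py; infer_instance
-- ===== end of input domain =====

-- B replaces A's one-pass character automaton by a segment-based parser (slice at each
-- operator, read the segment's digits): an alternative decomposition of the same O(n) task.

-- shared helpers: ch in "XYZI"; int(<digit string>) totalised with 0 outside Pre_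
def pvIsOp (c : Char) : Bool := ['X', 'Y', 'Z', 'I'].contains c
def pvIntOf (ds : List Char) : Int := (PySem.Int.ofChars? ds).getD 0

-- ===== PORT A =====
def pvStepA (st : List (String × Int) × Option Char × List Char) (ch : Char) :
    List (String × Int) × Option Char × List Char :=
  if pvIsOp ch then
    (match st.2.1 with
     | some op => st.1 ++ [(String.ofList [op], pvIntOf st.2.2)]
     | none => st.1, some ch, [])
  else if PySem.Chars.isdigit ch then (st.1, st.2.1, st.2.2 ++ [ch])
  else st

-- the trailing 'if current_op is not None: terms.append(...)'
def pvFinishA (st : List (String × Int) × Option Char × List Char) : List (String × Int) :=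
  match st.2.1 with
  | some op => st.1 ++ [(String.ofList [op], pvIntOf st.2.2)]
  | none => st.1

def parse_pauli_string_py (pauli_string : String) : List (String × Int) :=
  pvFinishA (pauli_string.toList.foldl pvStepA ([], none, []))

-- ===== PORT B =====
def pvAltGo : List Char → List (String × Int)
  | [] => []
  | c :: rest =>
    let segLen := (rest.takeWhile (fun d => !pvIsOp d)).length
    (String.ofList [c], pvIntOf ((rest.take segLen).filter PySem.Chars.isdigit))
      :: pvAltGo (rest.drop segLen)
termination_by l => l.length
decreasing_by simp

def parse_pauli_string_py_alt (pauli_string : String) : List (String × Int) :=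
  pvAltGo (pauli_string.toList.dropWhile (fun c => !pvIsOp c))

-- ===== PRECONDITION & SPEC =====
-- Pre_ excludes exactly the inputs where A raises ValueError on int of an empty digit string: some operator
-- character with no digit between it and the next operator / the end of the string.
def Pre_parse_pauli_string_py (pauli_string : String) : Prop :=
  ∀ i, (h : i < pauli_string.toList.length) → pvIsOp pauli_string.toList[i] →
    ((pauli_string.toList.drop (i+1)).takeWhile (fun c => !pvIsOp c)).any PySem.Chars.isdigit
instance (pauli_string : String) : Decidable (Pre_parse_pauli_string_py pauli_string) := by
  unfold Pre_parse_pauli_string_py; infer_instance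

def pvWitness_parse_pauli_string_py : String := "Z0Z1"

def Spec_parse_pauli_string_py (pauli_string : String) (out : List (String × Int)) : Prop := out = parse_pauli_string_py_alt pauli_string
instance (pauli_string : String) (out : List (String × Int)) : Decidable (Spec_parse_pauli_string_py pauli_string out) := by unfold Spec_parse_pauli_string_py; infer_instance

-- ===== CLAIM (what is proved, stated in full; the proofs are below) =====
def Claim_equal_parse_pauli_string_py : Prop := ∀ (pauli_string : String), Dom_parse_pauli_string_py pauli_string → Pre_parse_pauli_string_py pauli_string → Spec_parse_pauli_string_py pauli_string (parse_pauli_string_py pauli_string)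

-- ===== LEMMAS AND PROOFS =====

-- common reference function: A's pending term followed by one term per later operator
def pvEmit : Option (Char × List Char) → List (String × Int)
  | none => []
  | some (op, ds) => [(String.ofList [op], pvIntOf ds)]

def pvSpecFun : Option (Char × List Char) → List Char → List (String × Int)
  | pend, [] => pvEmit pend
  | pend, c :: rest =>
    if pvIsOp c then pvEmit pend ++ pvSpecFun (some (c, [])) rest
    else if PySem.Chars.isdigit c then pvSpecFun (pend.map (fun p => (p.1, p.2 ++ [c]))) rest
    else pvSpecFun pend rest

-- per-operator form of the same value
def pvG : List Char → List (String × Int)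
  | [] => []
  | c :: rest =>
    if pvIsOp c then
      (String.ofList [c], pvIntOf ((rest.takeWhile (fun d => !pvIsOp d)).filter PySem.Chars.isdigit))
        :: pvG rest
    else pvG rest

theorem pvFoldA_spec (l : List Char) : ∀ (acc : List (String × Int)) (op? : Option Char) (ds : List Char),
    pvFinishA (l.foldl pvStepA (acc, op?, ds))
      = acc ++ pvSpecFun (op?.map (fun o => (o, ds))) l := by
  induction l with
  | nil =>
    intro acc op? ds
    cases op? <;> simp [pvFinishA, pvSpecFun, pvEmit]
  | cons c rest ih =>
    intro acc op? ds
    simp only [List.foldl_cons, pvStepA, pvSpecFun]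
    by_cases hop : pvIsOp c
    · cases op? with
      | none => simp [hop, ih, pvEmit]
      | some op => simp [hop, ih, pvEmit]
    · by_cases hdig : PySem.Chars.isdigit c
      · cases op? with
        | none => simp [hop, hdig, ih]
        | some op => simp [hop, hdig, ih]
      · cases op? <;> simp [hop, hdig, ih]

theorem pvSpecFun_some (l : List Char) : ∀ (op : Char) (ds : List Char),
    pvSpecFun (some (op, ds)) l
      = (String.ofList [op],
          pvIntOf (ds ++ (l.takeWhile (fun d => !pvIsOp d)).filter PySem.Chars.isdigit))
        :: pvG l := by
  induction l with
  | nil => intro op ds; simp [pvSpecFun, pvEmit, pvG]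
  | cons c rest ih =>
    intro op ds
    by_cases hop : pvIsOp c
    · simp [pvSpecFun, pvG, hop, pvEmit, ih]
    · by_cases hdig : PySem.Chars.isdigit c
      · simp [pvSpecFun, pvG, hop, hdig, ih]
      · simp [pvSpecFun, pvG, hop, hdig, ih]

theorem pvSpecFun_none (l : List Char) : pvSpecFun none l = pvG l := by
  induction l with
  | nil => simp [pvSpecFun, pvEmit, pvG]
  | cons c rest ih =>
    by_cases hop : pvIsOp c
    · simp [pvSpecFun, pvG, hop, pvEmit, pvSpecFun_some]
    · by_cases hdig : PySem.Chars.isdigit c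
      · simp [pvSpecFun, pvG, hop, hdig, ih]
      · simp [pvSpecFun, pvG, hop, hdig, ih]

theorem pvAltGo_dropWhile (n : Nat) : ∀ (l : List Char), l.length ≤ n →
    pvAltGo (l.dropWhile (fun c => !pvIsOp c)) = pvG l := by
  induction n with
  | zero =>
    intro l hl
    have : l = [] := List.length_eq_zero_iff.mp (Nat.le_zero.mp hl)
    subst this
    rw [List.dropWhile_nil, pvAltGo.eq_def, pvG.eq_def]
  | succ n ih =>
    intro l hl
    cases l with
    | nil => rw [List.dropWhile_nil, pvAltGo.eq_def, pvG.eq_def]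
    | cons c rest =>
      by_cases hop : pvIsOp c
      · have hdw : (c :: rest).dropWhile (fun c => !pvIsOp c) = c :: rest := by
          simp [hop]
        have htw : rest.take (rest.takeWhile (fun d => !pvIsOp d)).length
            = rest.takeWhile (fun d => !pvIsOp d) := by
          nth_rewrite 2 [← List.takeWhile_append_dropWhile (p := fun d => !pvIsOp d) (l := rest)]
          exact List.take_left
        have hdr : rest.drop (rest.takeWhile (fun d => !pvIsOp d)).length
            = rest.dropWhile (fun d => !pvIsOp d) := by
          nth_rewrite 2 [← List.takeWhile_append_dropWhile (p := fun d => !pvIsOp d) (l := rest)]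
          exact List.drop_left
        rw [hdw, pvAltGo, htw, hdr, ih rest (by simp at hl; omega)]
        simp [pvG, hop]
      · have hdw : (c :: rest).dropWhile (fun c => !pvIsOp c) = rest.dropWhile (fun c => !pvIsOp c) := by
          simp [hop]
        rw [hdw, ih rest (by simp at hl; omega)]
        simp [pvG, hop]

-- ===== VERDICT (by name: the statement is the Claim_ definition above) =====
theorem parse_pauli_string_py_spec : Claim_equal_parse_pauli_string_py := by
  intro s _ _
  unfold Spec_parse_pauli_string_py parse_pauli_string_py parse_pauli_string_py_alt
  rw [pvFoldA_spec, pvAltGo_dropWhile s.toList.length s.toList (le_refl _)]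
  simp [pvSpecFun_none]
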